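-- pv_equiv track=rewrite | github.com/use-ash/apex | server/ws_handler_premium.py | _count_pair_volleys
-- ===== SOURCE A (Python) =====
-- def _count_pair_volleys(chain: list[str], agent_a: str, agent_b: str) -> int:
--     """Count consecutive back-and-forth hops between the same two agents at the tail of the chain."""
--     pair = {agent_a.lower(), agent_b.lower()}
--     count = 0
--     for i in range(len(chain) - 1, 0, -1):
--         if {chain[i].lower(), chain[i - 1].lower()} == pair:
--             count += 1
--         else:
--             break
--     return count
-- ===== SOURCE B (Python) =====
-- def _count_pair_volleys(chain: list[str], agent_a: str, agent_b: str) -> int: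
--     """Single forward pass: count resets on mismatch, so it ends as the trailing run length."""
--     pair = {agent_a.lower(), agent_b.lower()}
--     count = 0
--     for i in range(1, len(chain)):
--         if {chain[i].lower(), chain[i - 1].lower()} == pair:
--             count += 1
--         else:
--             count = 0
--     return count
-- ===== Notes on version B (the rewrite author's own statement) =====
-- stated objective: alternative
-- what changed: Replaces the backward scan with break by a single forward pass whose counter resets to 0 on mismatch, so the accumulator ends holding the trailing run length.
import Mathlib
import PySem

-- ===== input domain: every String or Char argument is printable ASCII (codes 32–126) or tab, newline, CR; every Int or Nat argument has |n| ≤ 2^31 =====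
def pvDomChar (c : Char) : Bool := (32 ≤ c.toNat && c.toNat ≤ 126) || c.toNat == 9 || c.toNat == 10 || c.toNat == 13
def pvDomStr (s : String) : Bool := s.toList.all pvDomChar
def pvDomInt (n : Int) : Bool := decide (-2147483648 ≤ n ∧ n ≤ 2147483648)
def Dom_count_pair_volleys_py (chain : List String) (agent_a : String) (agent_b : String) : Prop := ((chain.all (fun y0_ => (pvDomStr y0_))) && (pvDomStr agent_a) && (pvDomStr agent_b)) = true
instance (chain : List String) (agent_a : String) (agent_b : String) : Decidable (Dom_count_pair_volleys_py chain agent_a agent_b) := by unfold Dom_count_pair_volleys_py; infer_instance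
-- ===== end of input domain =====

-- ===== PORT A =====
-- backward loop over range(len(chain)-1, 0, -1); 'break' = stop recursing.
-- indices from this range are always in range, so pyGetD's default "" is never used.
def pvAOk (chain : List String) (pair : PySem.Set String) (i : Int) : Bool :=
  PySem.Set.equal
    (PySem.Set.ofList [PySem.Str.lower (PySem.List.pyGetD chain i ""),
                       PySem.Str.lower (PySem.List.pyGetD chain (i - 1) "")]) pair

def pvALoop (chain : List String) (pair : PySem.Set String) : List Int → Int
  | [] => 0
  | i :: rest => if pvAOk chain pair i then 1 + pvALoop chain pair rest else 0

def count_pair_volleys_py (chain : List String) (agent_a : String) (agent_b : String) : Int :=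
  let pair := PySem.Set.ofList [PySem.Str.lower agent_a, PySem.Str.lower agent_b]
  pvALoop chain pair (PySem.List.pyRange (PySem.List.len chain - 1) 0 (-1))

-- ===== PORT B =====
-- forward pass over range(1, len(chain)): counter resets to 0 on mismatch.
def count_pair_volleys_py_alt (chain : List String) (agent_a : String) (agent_b : String) : Int :=
  let pair := PySem.Set.ofList [PySem.Str.lower agent_a, PySem.Str.lower agent_b]
  (PySem.List.pyRange 1 (PySem.List.len chain) 1).foldl
    (fun count i =>
      if PySem.Set.equal
           (PySem.Set.ofList [PySem.Str.lower (PySem.List.pyGetD chain i ""),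
                              PySem.Str.lower (PySem.List.pyGetD chain (i - 1) "")]) pair
      then count + 1 else 0) 0

-- ===== PRECONDITION & SPEC =====
def Spec_count_pair_volleys_py (chain : List String) (agent_a : String) (agent_b : String) (out : Int) : Prop := out = count_pair_volleys_py_alt chain agent_a agent_b
instance (chain : List String) (agent_a : String) (agent_b : String) (out : Int) : Decidable (Spec_count_pair_volleys_py chain agent_a agent_b out) := by unfold Spec_count_pair_volleys_py; infer_instance

-- ===== CLAIM (what is proved, stated in full; the proofs are below) =====
def Claim_equal_count_pair_volleys_py : Prop := ∀ (chain : List String) (agent_a : String) (agent_b : String), Dom_count_pair_volleys_py chain agent_a agent_b → Spec_count_pair_volleys_py chain agent_a agent_b (count_pair_volleys_py chain agent_a agent_b)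

-- ===== LEMMAS AND PROOFS =====

-- trailing-run count over the reversed index list = forward fold with reset
theorem pvALoop_reverse_eq_foldl (chain : List String) (pair : PySem.Set String)
    (l : List Int) :
    pvALoop chain pair l.reverse =
      l.foldl (fun count i => if pvAOk chain pair i then count + 1 else 0) 0 := by
  induction l using List.reverseRecOn with
  | nil => rfl
  | append_singleton l i ih =>
    simp [List.foldl_append, pvALoop, ← ih]
    by_cases h : pvAOk chain pair i <;> simp [h, add_comm]

-- ===== VERDICT (by name: the statement is the Claim_ definition above) =====
theorem count_pair_volleys_py_spec : Claim_equal_count_pair_volleys_py := by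
  intro chain agent_a agent_b _
  unfold Spec_count_pair_volleys_py count_pair_volleys_py count_pair_volleys_py_alt
  have hr : PySem.List.pyRange (PySem.List.len chain - 1) 0 (-1)
      = (PySem.List.pyRange 1 (PySem.List.len chain) 1).reverse := by
    rw [PySem.List.pyRange_neg_one_eq_reverse]; norm_num
  rw [hr, pvALoop_reverse_eq_foldl]
  rfl
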